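-- pv_equiv track=rewrite | github.com/marcioluisms/hotelly2 | migrations/env_helpers.py | _parse_libpq_dsn
-- ===== SOURCE A (Python) =====
-- def _parse_libpq_dsn(dsn: str) -> dict[str, str]:
--     """Parse libpq key=value DSN, handling single-quoted values."""
--     tokens: dict[str, str] = {}
--     i, n = 0, len(dsn)
--     while i < n:
--         # skip whitespace
--         while i < n and dsn[i] == " ":
--             i += 1
--         if i >= n:
--             break
--         # read key
--         key_start = i
--         while i < n and dsn[i] != "=":
--             i += 1
--         if i >= n:
--             break
--         key = dsn[key_start:i]
--         i += 1  # skip '='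
--         # read value
--         if i < n and dsn[i] == "'":
--             i += 1  # skip opening quote
--             parts: list[str] = []
--             while i < n:
--                 if dsn[i] == "\\" and i + 1 < n:
--                     parts.append(dsn[i + 1])
--                     i += 2
--                 elif dsn[i] == "'":
--                     i += 1
--                     break
--                 else:
--                     parts.append(dsn[i])
--                     i += 1
--             tokens[key] = "".join(parts)
--         else:
--             val_start = i
--             while i < n and dsn[i] != " ":
--                 i += 1
--             tokens[key] = dsn[val_start:i]
--     return tokens
-- ===== SOURCE B (Python) =====
-- def _parse_libpq_dsn(dsn: str) -> dict[str, str]: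
--     """Parse libpq key=value DSN via a one-pass character state machine."""
--     tokens: dict[str, str] = {}
--     # states: 'skip', 'key', 'startval', 'unq', 'quo', 'quoesc'
--     state = "skip"
--     key = ""
--     buf = ""
--     for c in dsn:
--         if state == "skip":
--             if c == " ":
--                 pass
--             elif c == "=":
--                 key, state = "", "startval"
--             else:
--                 buf, state = c, "key"
--         elif state == "key":
--             if c == "=":
--                 key, state = buf, "startval"
--             else:
--                 buf += c
--         elif state == "startval":
--             if c == " ":
--                 tokens[key] = ""
--                 state = "skip"
--             elif c == "'":
--                 buf, state = "", "quo"
--             else: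
--                 buf, state = c, "unq"
--         elif state == "unq":
--             if c == " ":
--                 tokens[key] = buf
--                 state = "skip"
--             else:
--                 buf += c
--         elif state == "quo":
--             if c == "\\":
--                 state = "quoesc"
--             elif c == "'":
--                 tokens[key] = buf
--                 state = "skip"
--             else:
--                 buf += c
--         else:  # quoesc
--             buf += c
--             state = "quo"
--     # EOF flush: a dangling key (no '=') is dropped; an open value commits
--     if state == "startval":
--         tokens[key] = ""
--     elif state == "unq" or state == "quo":
--         tokens[key] = buf
--     elif state == "quoesc":
--         tokens[key] = buf + "\\"
--     return tokens
-- ===== Notes on version B (the rewrite author's own statement) =====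
-- stated objective: alternative
-- what changed: Replaced A's index-based nested while-loops with a single forward pass over the characters driven by an explicit six-state machine (skip/key/start-value/unquoted/quoted/escape) with an EOF flush.
import Mathlib
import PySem

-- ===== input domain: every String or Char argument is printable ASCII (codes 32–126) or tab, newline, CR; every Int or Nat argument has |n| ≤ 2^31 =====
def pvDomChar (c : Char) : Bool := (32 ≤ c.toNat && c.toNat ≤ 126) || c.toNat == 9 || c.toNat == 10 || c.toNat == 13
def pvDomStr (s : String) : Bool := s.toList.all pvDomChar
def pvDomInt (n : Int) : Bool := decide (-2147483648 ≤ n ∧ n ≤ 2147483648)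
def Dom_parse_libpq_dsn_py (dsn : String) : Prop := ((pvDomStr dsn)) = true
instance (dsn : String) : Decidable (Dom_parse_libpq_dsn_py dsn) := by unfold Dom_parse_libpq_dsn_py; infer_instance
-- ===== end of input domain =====

-- B replaces A's index-based nested while-loops by a one-pass explicit state machine (alternative decomposition, same O(n) cost).

-- ===== PORT A =====
-- A's "skip whitespace" inner while-loop (index advance ported as consuming the char list)
def skipSpacesA : List Char → List Char
  | [] => []
  | c :: r => if c = ' ' then skipSpacesA r else c :: r

-- A's "read key until '='" while-loop; none = reached end of string without '=' (A breaks)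
def readKeyA : List Char → Option (List Char × List Char)
  | [] => none
  | c :: r => if c = '=' then some ([], r) else (readKeyA r).map (fun p => (c :: p.1, p.2))

-- A's quoted-value while-loop: parts accumulator, backslash with one-char lookahead
def readQA (acc : List Char) : List Char → List Char × List Char
  | [] => (acc, [])
  | c :: r =>
    if c = '\\' then
      match r with
      | [] => (acc ++ [c], [])          -- "i + 1 < n" fails: falls through to the plain append
      | c2 :: r2 => readQA (acc ++ [c2]) r2
    else if c = '\'' then (acc, r)
    else readQA (acc ++ [c]) r

-- A's unquoted-value while-loop: read until space
def readUnqA : List Char → List Char × List Char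
  | [] => ([], [])
  | c :: r => if c = ' ' then ([], c :: r) else ((c :: (readUnqA r).1), (readUnqA r).2)

-- A's value branch: "if i < n and dsn[i] == '\''" then quoted else unquoted
def readValA : List Char → List Char × List Char
  | [] => readUnqA []
  | c :: r => if c = '\'' then readQA [] r else readUnqA (c :: r)

-- unfold equations used by the termination argument and the proofs below
theorem skipSpacesA_space (r : List Char) : skipSpacesA (' ' :: r) = skipSpacesA r := rfl

theorem skipSpacesA_cons (c : Char) (r : List Char) (h : ¬ c = ' ') :
    skipSpacesA (c :: r) = c :: r := by
  show (if c = ' ' then skipSpacesA r else c :: r) = c :: r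
  rw [if_neg h]

theorem readKeyA_eqc (r : List Char) : readKeyA ('=' :: r) = some ([], r) := rfl

theorem readKeyA_cons (c : Char) (r : List Char) (h : ¬ c = '=') :
    readKeyA (c :: r) = (readKeyA r).map (fun p => (c :: p.1, p.2)) := by
  show (if c = '=' then some (([] : List Char), r) else (readKeyA r).map (fun p => (c :: p.1, p.2))) = _
  rw [if_neg h]

theorem readQA_nil (acc : List Char) : readQA acc [] = (acc, []) := by
  rw [readQA.eq_def]

theorem readQA_bs1 (acc : List Char) : readQA acc ['\\'] = (acc ++ ['\\'], []) := by
  rw [readQA.eq_def]; simp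

theorem readQA_bs2 (acc : List Char) (c2 : Char) (r2 : List Char) :
    readQA acc ('\\' :: c2 :: r2) = readQA (acc ++ [c2]) r2 := by
  rw [readQA.eq_def]; simp

theorem readQA_quote (acc : List Char) (r : List Char) : readQA acc ('\'' :: r) = (acc, r) := by
  rw [readQA.eq_def]; simp

theorem readQA_other (acc : List Char) (c : Char) (r : List Char)
    (h1 : ¬ c = '\\') (h2 : ¬ c = '\'') :
    readQA acc (c :: r) = readQA (acc ++ [c]) r := by
  rw [readQA.eq_def]; simp [h1, h2]

theorem readUnqA_nil : readUnqA [] = ([], []) := rfl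

theorem readUnqA_space (r : List Char) : readUnqA (' ' :: r) = ([], ' ' :: r) := rfl

theorem readUnqA_cons (c : Char) (r : List Char) (h : ¬ c = ' ') :
    readUnqA (c :: r) = (c :: (readUnqA r).1, (readUnqA r).2) := by
  show (if c = ' ' then (([] : List Char), c :: r) else (c :: (readUnqA r).1, (readUnqA r).2)) = _
  rw [if_neg h]

theorem readValA_nil : readValA [] = ([], []) := rfl

theorem readValA_quote (r : List Char) : readValA ('\'' :: r) = readQA [] r := rfl

theorem readValA_cons (c : Char) (r : List Char) (h : ¬ c = '\'') :
    readValA (c :: r) = readUnqA (c :: r) := by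
  show (if c = '\'' then readQA [] r else readUnqA (c :: r)) = _
  rw [if_neg h]

theorem skipSpacesA_len : ∀ cs : List Char, (skipSpacesA cs).length ≤ cs.length
  | [] => by simp [skipSpacesA]
  | c :: r => by
    by_cases h : c = ' '
    · subst h
      rw [skipSpacesA_space]
      exact le_trans (skipSpacesA_len r) (by simp)
    · rw [skipSpacesA_cons c r h]

theorem readKeyA_len : ∀ (cs k rest : List Char), readKeyA cs = some (k, rest) → rest.length < cs.length
  | [], k, rest => by simp [readKeyA]
  | c :: r, k, rest => by
    intro h
    by_cases hc : c = '='
    · subst hc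
      rw [readKeyA_eqc] at h
      simp only [Option.some.injEq, Prod.mk.injEq] at h
      simp [← h.2]
    · rw [readKeyA_cons c r hc] at h
      simp only [Option.map_eq_some_iff] at h
      obtain ⟨⟨k', rest'⟩, hp, he⟩ := h
      have := readKeyA_len r k' rest' hp
      simp only [Prod.mk.injEq] at he
      simp only [← he.2, List.length_cons]
      omega

theorem readQA_len : ∀ (acc cs : List Char), (readQA acc cs).2.length ≤ cs.length
  | acc, [] => by simp [readQA_nil]
  | acc, c :: r => by
    by_cases h1 : c = '\\'
    · subst h1
      cases r with
      | nil => simp [readQA_bs1]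
      | cons c2 r2 =>
        rw [readQA_bs2]
        refine le_trans (readQA_len (acc ++ [c2]) r2) ?_
        simp only [List.length_cons]
        omega
    · by_cases h2 : c = '\''
      · subst h2
        simp [readQA_quote]
      · rw [readQA_other acc c r h1 h2]
        exact le_trans (readQA_len (acc ++ [c]) r) (by simp)

theorem readUnqA_len : ∀ cs : List Char, (readUnqA cs).2.length ≤ cs.length
  | [] => by simp [readUnqA_nil]
  | c :: r => by
    by_cases h : c = ' '
    · subst h
      simp [readUnqA_space]
    · rw [readUnqA_cons c r h]
      exact le_trans (readUnqA_len r) (by simp)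

theorem readValA_len : ∀ cs : List Char, (readValA cs).2.length ≤ cs.length
  | [] => by simp [readValA_nil]
  | c :: r => by
    by_cases h : c = '\''
    · subst h
      rw [readValA_quote]
      exact le_trans (readQA_len [] r) (by simp)
    · rw [readValA_cons c r h]
      exact readUnqA_len (c :: r)

-- A's outer while-loop
def loopA (d : PySem.Dict String String) (cs : List Char) : PySem.Dict String String :=
  match h : skipSpacesA cs with
  | [] => d
  | c :: r =>
    match hk : readKeyA (c :: r) with
    | none => d
    | some (k, rest) =>
      loopA (d.insert (String.ofList k) (String.ofList (readValA rest).1)) (readValA rest).2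
termination_by cs.length
decreasing_by
  have h1 := skipSpacesA_len cs
  have h2 := readKeyA_len _ _ _ hk
  have h3 := readValA_len rest
  rw [h] at h1
  simp only [List.length_cons] at h1 h2
  omega

def parse_libpq_dsn_py (dsn : String) : List (String × String) :=
  (loopA PySem.Dict.empty dsn.toList).items

-- ===== PORT B =====
inductive PState where
  | skip
  | key (buf : List Char)
  | startVal (k : List Char)
  | unq (k : List Char) (buf : List Char)
  | quo (k : List Char) (buf : List Char)
  | quoEsc (k : List Char) (buf : List Char)
deriving Repr, DecidableEq

def stepB (s : PySem.Dict String String × PState) (c : Char) :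
    PySem.Dict String String × PState :=
  match s with
  | (d, .skip) =>
    if c = ' ' then (d, .skip)
    else if c = '=' then (d, .startVal [])
    else (d, .key [c])
  | (d, .key buf) =>
    if c = '=' then (d, .startVal buf) else (d, .key (buf ++ [c]))
  | (d, .startVal k) =>
    if c = ' ' then (d.insert (String.ofList k) "", .skip)
    else if c = '\'' then (d, .quo k [])
    else (d, .unq k [c])
  | (d, .unq k buf) =>
    if c = ' ' then (d.insert (String.ofList k) (String.ofList buf), .skip)
    else (d, .unq k (buf ++ [c]))
  | (d, .quo k buf) =>
    if c = '\\' then (d, .quoEsc k buf)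
    else if c = '\'' then (d.insert (String.ofList k) (String.ofList buf), .skip)
    else (d, .quo k (buf ++ [c]))
  | (d, .quoEsc k buf) => (d, .quo k (buf ++ [c]))

def flushB (s : PySem.Dict String String × PState) : PySem.Dict String String :=
  match s with
  | (d, .skip) => d
  | (d, .key _) => d
  | (d, .startVal k) => d.insert (String.ofList k) ""
  | (d, .unq k buf) => d.insert (String.ofList k) (String.ofList buf)
  | (d, .quo k buf) => d.insert (String.ofList k) (String.ofList buf)
  | (d, .quoEsc k buf) => d.insert (String.ofList k) (String.ofList (buf ++ ['\\']))

def parse_libpq_dsn_py_alt (dsn : String) : List (String × String) :=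
  (flushB (dsn.toList.foldl stepB (PySem.Dict.empty, .skip))).items

-- ===== PRECONDITION & SPEC =====
def Spec_parse_libpq_dsn_py (dsn : String) (out : List (String × String)) : Prop := out = parse_libpq_dsn_py_alt dsn
instance (dsn : String) (out : List (String × String)) : Decidable (Spec_parse_libpq_dsn_py dsn out) := by unfold Spec_parse_libpq_dsn_py; infer_instance

-- ===== CLAIM (what is proved, stated in full; the proofs are below) =====
def Claim_equal_parse_libpq_dsn_py : Prop := ∀ (dsn : String), Dom_parse_libpq_dsn_py dsn → Spec_parse_libpq_dsn_py dsn (parse_libpq_dsn_py dsn)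

-- ===== LEMMAS AND PROOFS =====

theorem ofList_nil_eq : String.ofList [] = "" := by decide

-- A's loop body once the leading spaces are gone
def loopBody (d : PySem.Dict String String) : List Char → PySem.Dict String String
  | [] => d
  | c :: r =>
    match readKeyA (c :: r) with
    | none => d
    | some (k, rest) =>
        loopA (d.insert (String.ofList k) (String.ofList (readValA rest).1)) (readValA rest).2

theorem loopA_eq (d : PySem.Dict String String) (cs : List Char) :
    loopA d cs = loopBody d (skipSpacesA cs) := by
  rw [loopA.eq_def]
  split
  · next h => rw [h]; rfl
  · next c r h =>
    rw [h]
    split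
    · next hk =>
      simp only [loopBody]
      rw [hk]
    · next k rest hk =>
      simp only [loopBody]
      rw [hk]

theorem loopA_nil (d : PySem.Dict String String) : loopA d [] = d :=
  (loopA_eq d []).trans rfl

theorem loopA_space (d : PySem.Dict String String) (r : List Char) :
    loopA d (' ' :: r) = loopA d r := by
  rw [loopA_eq, loopA_eq, skipSpacesA_space]

theorem loopA_nonspace (d : PySem.Dict String String) (c : Char) (r : List Char) (hc : ¬ c = ' ') :
    loopA d (c :: r) = loopBody d (c :: r) := by
  rw [loopA_eq, skipSpacesA_cons c r hc]

-- how A's parser resumes from each of B's machine states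
def resumeA (d : PySem.Dict String String) : PState → List Char → PySem.Dict String String
  | .skip, cs => loopA d cs
  | .key buf, cs =>
    match readKeyA cs with
    | none => d
    | some (k, rest) =>
        loopA (d.insert (String.ofList (buf ++ k)) (String.ofList (readValA rest).1)) (readValA rest).2
  | .startVal k, cs =>
      loopA (d.insert (String.ofList k) (String.ofList (readValA cs).1)) (readValA cs).2
  | .unq k buf, cs =>
      loopA (d.insert (String.ofList k) (String.ofList (buf ++ (readUnqA cs).1))) (readUnqA cs).2
  | .quo k buf, cs =>
      loopA (d.insert (String.ofList k) (String.ofList (readQA buf cs).1)) (readQA buf cs).2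
  | .quoEsc k buf, cs =>
    match cs with
    | [] => d.insert (String.ofList k) (String.ofList (buf ++ ['\\']))
    | c :: r =>
        loopA (d.insert (String.ofList k) (String.ofList (readQA (buf ++ [c]) r).1)) (readQA (buf ++ [c]) r).2

theorem resumeA_nil (d : PySem.Dict String String) (st : PState) :
    flushB (d, st) = resumeA d st [] := by
  cases st with
  | skip => exact (loopA_nil d).symm
  | key buf => rfl
  | startVal k =>
    simp only [flushB, resumeA, readValA_nil, loopA_nil, ofList_nil_eq]
  | unq k buf =>
    simp only [flushB, resumeA, readUnqA_nil, loopA_nil, List.append_nil]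
  | quo k buf =>
    simp only [flushB, resumeA, readQA_nil, loopA_nil]
  | quoEsc k buf => rfl

theorem master : ∀ (n : ℕ) (cs : List Char), cs.length ≤ n →
    ∀ (d : PySem.Dict String String) (st : PState),
      flushB (cs.foldl stepB (d, st)) = resumeA d st cs := by
  intro n
  induction n with
  | zero =>
    intro cs h d st
    have : cs = [] := List.eq_nil_of_length_eq_zero (Nat.le_zero.mp h)
    subst this
    exact resumeA_nil d st
  | succ n ih =>
    intro cs hlen d st
    cases cs with
    | nil => exact resumeA_nil d st
    | cons c r =>
      have hr : r.length ≤ n := by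
        simp only [List.length_cons] at hlen; omega
      simp only [List.foldl_cons]
      cases st with
      | skip =>
        by_cases h1 : c = ' '
        · subst h1
          rw [show stepB (d, PState.skip) ' ' = (d, PState.skip) from by simp [stepB]]
          rw [ih r hr d .skip]
          simp only [resumeA]
          rw [loopA_space]
        · by_cases h2 : c = '='
          · subst h2
            rw [show stepB (d, PState.skip) '=' = (d, PState.startVal []) from by simp [stepB]]
            rw [ih r hr d (.startVal [])]
            simp only [resumeA]
            rw [loopA_nonspace d '=' r (by decide)]
            simp only [loopBody, readKeyA_eqc]
          · rw [show stepB (d, PState.skip) c = (d, PState.key [c]) from by simp [stepB, h1, h2]]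
            rw [ih r hr d (.key [c])]
            simp only [resumeA]
            rw [loopA_nonspace d c r h1]
            simp only [loopBody, readKeyA_cons c r h2]
            rcases hk : readKeyA r with _ | ⟨k, rest⟩
            · rfl
            · simp
      | key buf =>
        by_cases h2 : c = '='
        · subst h2
          rw [show stepB (d, PState.key buf) '=' = (d, PState.startVal buf) from by simp [stepB]]
          rw [ih r hr d (.startVal buf)]
          simp only [resumeA, readKeyA_eqc]
          rw [List.append_nil]
        · rw [show stepB (d, PState.key buf) c = (d, PState.key (buf ++ [c])) from by
            simp [stepB, h2]]
          rw [ih r hr d (.key (buf ++ [c]))]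
          simp only [resumeA, readKeyA_cons c r h2]
          rcases hk : readKeyA r with _ | ⟨k, rest⟩
          · rfl
          · simp
      | startVal k =>
        by_cases h1 : c = ' '
        · subst h1
          rw [show stepB (d, PState.startVal k) ' ' =
              (d.insert (String.ofList k) "", PState.skip) from by simp [stepB]]
          rw [ih r hr _ .skip]
          simp only [resumeA, readValA_cons ' ' r (by decide), readUnqA_space]
          rw [loopA_space, ofList_nil_eq]
        · by_cases h2 : c = '\''
          · subst h2
            rw [show stepB (d, PState.startVal k) '\'' = (d, PState.quo k []) from by
              simp [stepB, h1]]
            rw [ih r hr d (.quo k [])]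
            simp only [resumeA, readValA_quote]
          · rw [show stepB (d, PState.startVal k) c = (d, PState.unq k [c]) from by
              simp [stepB, h1, h2]]
            rw [ih r hr d (.unq k [c])]
            simp only [resumeA, readValA_cons c r h2, readUnqA_cons c r h1,
              List.cons_append, List.nil_append]
      | unq k buf =>
        by_cases h1 : c = ' '
        · subst h1
          rw [show stepB (d, PState.unq k buf) ' ' =
              (d.insert (String.ofList k) (String.ofList buf), PState.skip) from by simp [stepB]]
          rw [ih r hr _ .skip]
          simp only [resumeA, readUnqA_space, List.append_nil]
          rw [loopA_space]
        · rw [show stepB (d, PState.unq k buf) c = (d, PState.unq k (buf ++ [c])) from by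
            simp [stepB, h1]]
          rw [ih r hr d (.unq k (buf ++ [c]))]
          simp only [resumeA, readUnqA_cons c r h1, List.append_assoc,
            List.cons_append, List.nil_append]
      | quo k buf =>
        by_cases h1 : c = '\\'
        · subst h1
          rw [show stepB (d, PState.quo k buf) '\\' = (d, PState.quoEsc k buf) from by
            simp [stepB]]
          rw [ih r hr d (.quoEsc k buf)]
          cases r with
          | nil =>
            simp only [resumeA, readQA_bs1]
            rw [loopA_nil]
          | cons c2 r2 =>
            simp only [resumeA, readQA_bs2]
        · by_cases h2 : c = '\''
          · subst h2
            rw [show stepB (d, PState.quo k buf) '\'' =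
                (d.insert (String.ofList k) (String.ofList buf), PState.skip) from by
              simp [stepB, h1]]
            rw [ih r hr _ .skip]
            simp only [resumeA, readQA_quote]
          · rw [show stepB (d, PState.quo k buf) c = (d, PState.quo k (buf ++ [c])) from by
              simp [stepB, h1, h2]]
            rw [ih r hr d (.quo k (buf ++ [c]))]
            simp only [resumeA, readQA_other buf c r h1 h2]
      | quoEsc k buf =>
        rw [show stepB (d, PState.quoEsc k buf) c = (d, PState.quo k (buf ++ [c])) from by
          simp [stepB]]
        rw [ih r hr d (.quo k (buf ++ [c]))]
        simp only [resumeA]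

theorem ports_agree (dsn : String) : parse_libpq_dsn_py dsn = parse_libpq_dsn_py_alt dsn := by
  unfold parse_libpq_dsn_py parse_libpq_dsn_py_alt
  rw [master dsn.toList.length dsn.toList le_rfl PySem.Dict.empty .skip]
  rfl

-- ===== VERDICT (by name: the statement is the Claim_ definition above) =====
theorem parse_libpq_dsn_py_spec : Claim_equal_parse_libpq_dsn_py := by
  intro dsn _
  unfold Spec_parse_libpq_dsn_py
  exact ports_agree dsn
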